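-- pv_equiv track=rewrite | github.com/frankbigshuai/ProgrammerRoadmap | app/services/recommendation_engine.py | _process_learning_styles
-- ===== SOURCE A (Python) =====
-- from typing import Dict, List, Optional, Tuple
--
-- def _process_learning_styles(styles: List[Dict]) -> Dict:
--     """处理学习方式偏好"""
--     preferences = {
--         'hands_on': 0,
--         'theoretical': 0,
--         'video': 0,
--         'reading': 0,
--         'interactive': 0
--     }
--
--     for style in styles:
--         if isinstance(style, dict):
--             for key, value in style.items():
--                 if key in preferences:
--                     preferences[key] += value
--
--     return preferences
-- ===== SOURCE B (Python) =====
-- def _process_learning_styles(styles):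
--     """处理学习方式偏好"""
--     keys = ['hands_on', 'theoretical', 'video', 'reading', 'interactive']
--     return {k: sum(v for style in styles if isinstance(style, dict)
--                      for kk, v in style.items() if kk == k)
--             for k in keys}
-- ===== Notes on version B (the rewrite author's own statement) =====
-- stated objective: idiomatic
-- what changed: Inverts the nesting: instead of scattering each style dict's items into a mutable accumulator dict, B builds the result with a dict comprehension over the five fixed keys, summing that key's values across all dict entries.
import Mathlib
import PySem

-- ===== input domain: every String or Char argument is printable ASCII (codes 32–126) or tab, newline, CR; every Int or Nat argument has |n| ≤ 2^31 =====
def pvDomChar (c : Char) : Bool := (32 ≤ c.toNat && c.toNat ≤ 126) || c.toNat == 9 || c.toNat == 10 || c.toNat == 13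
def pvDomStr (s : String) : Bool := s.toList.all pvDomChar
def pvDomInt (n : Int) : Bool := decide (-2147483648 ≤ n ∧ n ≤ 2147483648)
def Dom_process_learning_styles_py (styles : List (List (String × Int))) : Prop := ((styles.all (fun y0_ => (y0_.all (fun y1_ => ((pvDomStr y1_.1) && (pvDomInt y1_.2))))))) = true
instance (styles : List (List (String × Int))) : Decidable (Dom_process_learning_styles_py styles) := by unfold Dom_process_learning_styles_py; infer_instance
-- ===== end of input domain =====

-- B replaces A's mutable accumulator dict with a dict comprehension over the five fixed keys (idiomatic; same result).

-- ===== PORT A =====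
-- under the type convention every element of `styles` is a dict, so `isinstance(style, dict)` is always True
def process_learning_styles_py (styles : List (List (String × Int))) : List (String × Int) :=
  let preferences : PySem.Dict String Int :=
    PySem.Dict.ofList [("hands_on", 0), ("theoretical", 0), ("video", 0), ("reading", 0), ("interactive", 0)]
  let final := styles.foldl (fun preferences style =>
    style.foldl (fun preferences kv =>
      if preferences.contains kv.1 then preferences.modify kv.1 0 (· + kv.2) else preferences)
      preferences) preferences
  final.items

-- ===== PORT B =====
-- sum(v for style in styles for kk, v in style.items() if kk == k), as a fold (isinstance always True)
def pvSumKey (styles : List (List (String × Int))) (k : String) : Int :=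
  styles.foldl (fun acc style =>
    style.foldl (fun acc kv => if kv.1 = k then acc + kv.2 else acc) acc) 0

def process_learning_styles_py_alt (styles : List (List (String × Int))) : List (String × Int) :=
  ["hands_on", "theoretical", "video", "reading", "interactive"].map (fun k => (k, pvSumKey styles k))

-- ===== PRECONDITION & SPEC =====
def Spec_process_learning_styles_py (styles : List (List (String × Int))) (out : List (String × Int)) : Prop := out = process_learning_styles_py_alt styles
instance (styles : List (List (String × Int))) (out : List (String × Int)) : Decidable (Spec_process_learning_styles_py styles out) := by unfold Spec_process_learning_styles_py; infer_instance

-- ===== CLAIM (what is proved, stated in full; the proofs are below) =====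
def Claim_equal_process_learning_styles_py : Prop := ∀ (styles : List (List (String × Int))), Dom_process_learning_styles_py styles → Spec_process_learning_styles_py styles (process_learning_styles_py styles)

-- ===== LEMMAS AND PROOFS =====

-- one style's contribution to key k
def pvG (k : String) (style : List (String × Int)) : Int :=
  style.foldl (fun acc kv => if kv.1 = k then acc + kv.2 else acc) 0

def pvMk5 (a b c d e : Int) : PySem.Dict String Int :=
  PySem.Dict.mk [("hands_on", a), ("theoretical", b), ("video", c), ("reading", d), ("interactive", e)]

theorem pvG_shift (k : String) (style : List (String × Int)) (x : Int) :
    style.foldl (fun acc kv => if kv.1 = k then acc + kv.2 else acc) x = x + pvG k style := by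
  induction style generalizing x with
  | nil => simp [pvG]
  | cons kv rest ih =>
    simp only [pvG, List.foldl_cons]
    rw [ih, ih (if kv.1 = k then 0 + kv.2 else 0)]
    split_ifs <;> ring

theorem pvG_cons (k : String) (kv : String × Int) (rest : List (String × Int)) :
    pvG k (kv :: rest) = (if kv.1 = k then kv.2 else 0) + pvG k rest := by
  simp only [pvG, List.foldl_cons]
  rw [pvG_shift]
  split_ifs <;> simp [pvG]

theorem pvStep (a b c d e : Int) (kv : String × Int) :
    (if (pvMk5 a b c d e).contains kv.1
      then (pvMk5 a b c d e).modify kv.1 0 (· + kv.2) else pvMk5 a b c d e)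
    = pvMk5 (a + if kv.1 = "hands_on" then kv.2 else 0)
            (b + if kv.1 = "theoretical" then kv.2 else 0)
            (c + if kv.1 = "video" then kv.2 else 0)
            (d + if kv.1 = "reading" then kv.2 else 0)
            (e + if kv.1 = "interactive" then kv.2 else 0) := by
  by_cases h1 : kv.1 = "hands_on"
  · simp [pvMk5, PySem.Dict.contains, PySem.Dict.modify, PySem.Dict.insert,
          PySem.Dict.getD, PySem.Dict.get?, h1]
  · by_cases h2 : kv.1 = "theoretical"
    · simp [pvMk5, PySem.Dict.contains, PySem.Dict.modify, PySem.Dict.insert,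
            PySem.Dict.getD, PySem.Dict.get?, h2]
    · by_cases h3 : kv.1 = "video"
      · simp [pvMk5, PySem.Dict.contains, PySem.Dict.modify, PySem.Dict.insert,
              PySem.Dict.getD, PySem.Dict.get?, h3]
      · by_cases h4 : kv.1 = "reading"
        · simp [pvMk5, PySem.Dict.contains, PySem.Dict.modify, PySem.Dict.insert,
                PySem.Dict.getD, PySem.Dict.get?, h4]
        · by_cases h5 : kv.1 = "interactive"
          · simp [pvMk5, PySem.Dict.contains, PySem.Dict.modify, PySem.Dict.insert,
                  PySem.Dict.getD, PySem.Dict.get?, h5]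
          · simp [pvMk5, PySem.Dict.contains, h1, h2, h3, h4, h5, Ne.symm h1, Ne.symm h2, Ne.symm h3, Ne.symm h4, Ne.symm h5]

theorem pvInner (style : List (String × Int)) (a b c d e : Int) :
    style.foldl (fun p kv =>
      if p.contains kv.1 then p.modify kv.1 0 (· + kv.2) else p) (pvMk5 a b c d e)
    = pvMk5 (a + pvG "hands_on" style) (b + pvG "theoretical" style) (c + pvG "video" style)
            (d + pvG "reading" style) (e + pvG "interactive" style) := by
  induction style generalizing a b c d e with
  | nil => simp [pvG]
  | cons kv rest ih =>
    simp only [List.foldl_cons, pvStep, ih, pvG_cons]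
    apply PySem.Dict.ext
    simp only [pvMk5]
    split_ifs <;> simp_all <;> ring

theorem pvOuter (styles : List (List (String × Int))) (a b c d e : Int) :
    styles.foldl (fun p style =>
      style.foldl (fun p kv =>
        if p.contains kv.1 then p.modify kv.1 0 (· + kv.2) else p) p) (pvMk5 a b c d e)
    = pvMk5 (a + (styles.map (pvG "hands_on")).sum) (b + (styles.map (pvG "theoretical")).sum)
            (c + (styles.map (pvG "video")).sum) (d + (styles.map (pvG "reading")).sum)
            (e + (styles.map (pvG "interactive")).sum) := by
  induction styles generalizing a b c d e with
  | nil => simp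
  | cons s rest ih =>
    simp only [List.foldl_cons, pvInner, ih, List.map_cons, List.sum_cons]
    apply PySem.Dict.ext
    simp only [pvMk5]
    simp
    refine ⟨by ring, by ring, by ring, by ring, by ring⟩

theorem pvSumKey_eq (styles : List (List (String × Int))) (k : String) :
    pvSumKey styles k = (styles.map (pvG k)).sum := by
  simp only [pvSumKey]
  have h : ∀ (l : List (List (String × Int))) (x : Int),
      l.foldl (fun acc style =>
        style.foldl (fun acc kv => if kv.1 = k then acc + kv.2 else acc) acc) x
      = x + (l.map (pvG k)).sum := by
    intro l
    induction l with
    | nil => simp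
    | cons s rest ih =>
      intro x
      simp only [List.foldl_cons, List.map_cons, List.sum_cons]
      rw [pvG_shift, ih]
      ring
  rw [h]
  ring

theorem pvInit : PySem.Dict.ofList
    [("hands_on", (0:Int)), ("theoretical", 0), ("video", 0), ("reading", 0), ("interactive", 0)]
    = pvMk5 0 0 0 0 0 := by decide

theorem process_learning_styles_py_spec : Claim_equal_process_learning_styles_py := by
  intro styles _
  unfold Spec_process_learning_styles_py process_learning_styles_py process_learning_styles_py_alt
  simp only [pvInit, pvOuter]
  simp [pvMk5, pvSumKey_eq]
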